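-- pv_equiv track=rewrite | github.com/s-surineni/atice | ppython/leet_code/patching_array.py | find_num_patches
-- ===== SOURCE A (Python) =====
-- def find_num_patches(nums, tar):
--     miss = 1
--     trk = 0
--     added = 0
--     while trk < len(nums):
--         if trk < len(nums) and nums[trk] <= miss:
--             miss += nums[trk]
--             trk += 1
--         else:
--             miss += miss
--             added += 1
--     return added
-- ===== SOURCE B (Python) =====
-- def find_num_patches(nums, tar):
--     # Single pass: when an element exceeds the current reach, compute the
--     # number of doublings at once via bit_length instead of doubling one by one.
--     miss = 1
--     added = 0
--     for x in nums:
--         if x <= miss: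
--             miss += x
--         else:
--             q = (x + miss - 1) // miss  # ceil(x / miss)
--             k = (q - 1).bit_length()    # minimal k with miss * 2**k >= x
--             added += k
--             miss = (miss << k) + x
--     return added
-- ===== Notes on version B (the rewrite author's own statement) =====
-- stated objective: alternative
-- what changed: Instead of doubling miss one step per loop iteration, B makes a single pass over nums and, when an element exceeds the current reach, computes the whole number of required doublings at once via ceil-division and bit_length, then applies them with one shift.
-- outside the precondition, e.g. on find_num_patches([-5], 0): A returns 0, B returns 0; on find_num_patches([-1, 1], 0): A does not finish within the time limit, B raises ZeroDivisionError
import Mathlib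
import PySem

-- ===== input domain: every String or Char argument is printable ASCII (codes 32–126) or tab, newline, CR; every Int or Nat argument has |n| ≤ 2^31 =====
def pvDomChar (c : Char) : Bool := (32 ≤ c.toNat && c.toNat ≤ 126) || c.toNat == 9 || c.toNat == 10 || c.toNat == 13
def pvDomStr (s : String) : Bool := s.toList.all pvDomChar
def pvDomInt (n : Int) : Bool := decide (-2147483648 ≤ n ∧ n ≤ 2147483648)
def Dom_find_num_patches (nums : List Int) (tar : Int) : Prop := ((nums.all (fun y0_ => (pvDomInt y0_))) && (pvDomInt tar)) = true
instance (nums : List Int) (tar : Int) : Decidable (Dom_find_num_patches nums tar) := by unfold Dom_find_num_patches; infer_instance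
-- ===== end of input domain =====

-- B replaces A's one-at-a-time doubling by computing, per element, the whole number of
-- required doublings at once with bit_length (an alternative single-pass formulation).

-- ===== PORT A =====
-- A's while-loop, step for step; the fuel argument only makes the recursion total
-- (on every input admitted by Pre_ the fuel proved below is never exhausted).
def findLoopA (nums : List Int) : Nat → Int → Int → Int → Int
  | 0, _, _, added => added
  | fuel + 1, miss, trk, added =>
    if trk < (nums.length : Int) then
      if (PySem.List.pyGet? nums trk).getD 0 ≤ miss then
        findLoopA nums fuel (miss + (PySem.List.pyGet? nums trk).getD 0) (trk + 1) added
      else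
        findLoopA nums fuel (miss + miss) trk (added + 1)
    else added

def find_num_patches (nums : List Int) (tar : Int) : Int :=
  findLoopA nums (33 * nums.length + 1) 1 0 0

-- ===== PORT B =====
def findLoopB : List Int → Int → Int → Int
  | [], _, added => added
  | x :: rest, miss, added =>
    if x ≤ miss then findLoopB rest (miss + x) added
    else
      let q := PySem.Int.floordiv (x + miss - 1) miss
      let k := PySem.Int.bitLength (q - 1)
      findLoopB rest ((miss <<< k) + x) (added + (k : Int))

def find_num_patches_alt (nums : List Int) (tar : Int) : Int :=
  findLoopB nums 1 0

-- ===== PRECONDITION & SPEC =====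
-- Pre_ excludes lists containing a negative element: there A's doubling loop can run
-- forever (e.g. [-1, 1]) and B raises or returns where A never does; on the few
-- negative inputs where A does return (all elements absorbed), B returns the same value.
def Pre_find_num_patches (nums : List Int) (tar : Int) : Prop := ∀ x ∈ nums, 0 ≤ x
instance (nums : List Int) (tar : Int) : Decidable (Pre_find_num_patches nums tar) := by
  unfold Pre_find_num_patches; infer_instance

def pvWitness_find_num_patches : List Int × Int := ([1, 2, 100], 5)

def Spec_find_num_patches (nums : List Int) (tar : Int) (out : Int) : Prop := out = find_num_patches_alt nums tar
instance (nums : List Int) (tar : Int) (out : Int) : Decidable (Spec_find_num_patches nums tar out) := by unfold Spec_find_num_patches; infer_instance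

-- ===== CLAIM (what is proved, stated in full; the proofs are below) =====
def Claim_equal_find_num_patches : Prop := ∀ (nums : List Int) (tar : Int), Dom_find_num_patches nums tar → Pre_find_num_patches nums tar → Spec_find_num_patches nums tar (find_num_patches nums tar)

-- ===== LEMMAS AND PROOFS =====

-- Arithmetic heart: for 1 ≤ miss < x, k = bit_length(ceil(x/miss) - 1) is exactly the
-- number of doublings A performs before x fits, and k ≤ 31 when x ≤ 2^31.
theorem step_facts (miss x : Int) (h1 : 1 ≤ miss) (h2 : miss < x) (hx : x ≤ 2147483648) :
    let q := PySem.Int.floordiv (x + miss - 1) miss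
    let k := PySem.Int.bitLength (q - 1)
    1 ≤ k ∧ k ≤ 31 ∧ miss * 2 ^ (k - 1) < x ∧ x ≤ miss * 2 ^ k := by
  intro q k
  have hb : (0:Int) < miss := by omega
  have hq : q * miss ≤ x + miss - 1 ∧ x + miss - 1 < (q + 1) * miss :=
    (PySem.Int.floordiv_eq_iff_of_pos hb).mp rfl
  have hxq : x ≤ q * miss := by nlinarith [hq.2]
  have hqx : (q - 1) * miss < x := by nlinarith [hq.1]
  have hq2 : 2 ≤ q := by nlinarith [hxq, hqx]
  have hqle : q ≤ x := by nlinarith [hq.1]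
  have hne : q - 1 ≠ 0 := by omega
  have hna : ((q - 1).natAbs : Int) = q - 1 := Int.natAbs_of_nonneg (by omega)
  have hlow : (2:Nat) ^ (k - 1) ≤ (q - 1).natAbs := PySem.Int.two_pow_bitLength_le _ hne
  have hhigh : (q - 1).natAbs < 2 ^ k := PySem.Int.lt_two_pow_bitLength _
  have hlowI : (2:Int) ^ (k - 1) ≤ q - 1 := by
    calc ((2:Int) ^ (k-1)) = ((2 ^ (k-1) : Nat) : Int) := by push_cast; ring
    _ ≤ ((q-1).natAbs : Int) := by exact_mod_cast hlow
    _ = q - 1 := hna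
  have hhighI : q - 1 < (2:Int) ^ k := by
    calc (q - 1) = ((q-1).natAbs : Int) := hna.symm
    _ < ((2 ^ k : Nat) : Int) := by exact_mod_cast hhigh
    _ = (2:Int) ^ k := by push_cast; ring
  have hk1 : 1 ≤ k := by
    by_contra h
    have : k = 0 := by omega
    rw [this] at hhigh
    omega
  refine ⟨hk1, ?_, ?_, ?_⟩
  · -- k ≤ 31
    by_contra h
    have h31 : 31 ≤ k - 1 := by omega
    have : (2:Nat) ^ 31 ≤ 2 ^ (k - 1) := Nat.pow_le_pow_right (by norm_num) h31
    have hle : (2:Nat) ^ 31 ≤ (q - 1).natAbs := le_trans this hlow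
    have : ((2:Int) ^ 31) ≤ q - 1 := by
      calc ((2:Int) ^ 31) = ((2 ^ 31 : Nat) : Int) := by push_cast; try ring
      _ ≤ ((q-1).natAbs : Int) := by exact_mod_cast hle
      _ = q - 1 := hna
    have hc : (2:Int) ^ 31 = 2147483648 := by norm_num
    omega
  · -- miss * 2^(k-1) < x
    calc miss * 2 ^ (k - 1) ≤ miss * (q - 1) := by
          apply mul_le_mul_of_nonneg_left hlowI (by omega)
      _ = (q - 1) * miss := by ring
      _ < x := hqx
  · -- x ≤ miss * 2^k
    have hq2k : q ≤ 2 ^ k := by omega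
    calc x ≤ q * miss := hxq
      _ ≤ 2 ^ k * miss := by apply mul_le_mul_of_nonneg_right hq2k (by omega)
      _ = miss * 2 ^ k := by ring

-- k doubling steps of A's loop, taken at once.
theorem loopA_doubles (nums : List Int) (k : Nat) :
    ∀ (fuel : Nat) (miss trk added : Int),
    trk < (nums.length : Int) →
    (∀ j : Nat, j < k → miss * 2 ^ j < (PySem.List.pyGet? nums trk).getD 0) →
    findLoopA nums (fuel + k) miss trk added
      = findLoopA nums fuel (miss * 2 ^ k) trk (added + (k : Int)) := by
  induction k with
  | zero => intro fuel miss trk added _ _; simp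
  | succ k ih =>
    intro fuel miss trk added hlt hd
    have h0 : miss * 1 < (PySem.List.pyGet? nums trk).getD 0 := by
      have := hd 0 (by omega); simpa using this
    have hstep : findLoopA nums (fuel + (k + 1)) miss trk added
        = findLoopA nums (fuel + k) (miss + miss) trk (added + 1) := by
      show findLoopA nums ((fuel + k) + 1) miss trk added = _
      rw [findLoopA]
      rw [if_pos hlt, if_neg (by omega)]
    rw [hstep, ih (fuel) (miss + miss) trk (added + 1) hlt
        (fun j hj => by
          have := hd (j + 1) (by omega)
          calc (miss + miss) * 2 ^ j = miss * 2 ^ (j + 1) := by ring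
            _ < _ := this)]
    congr 1
    · ring
    · push_cast; ring

theorem loop_eq (l : List Int) :
    ∀ (nums : List Int) (trk miss added : Int) (fuel : Nat),
    0 ≤ trk → l = nums.drop trk.toNat →
    (∀ x ∈ nums, 0 ≤ x ∧ x ≤ 2147483648) → 1 ≤ miss →
    33 * l.length + 1 ≤ fuel →
    findLoopA nums fuel miss trk added = findLoopB l miss added := by
  induction l with
  | nil =>
    intro nums trk miss added fuel htrk hdrop _ _ hfuel
    have hlen : nums.length ≤ trk.toNat := by
      by_contra h
      have : nums.drop trk.toNat ≠ [] := by
        apply List.ne_nil_of_length_pos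
        rw [List.length_drop]; omega
      exact this hdrop.symm
    obtain ⟨f, rfl⟩ : ∃ f, fuel = f + 1 := ⟨fuel - 1, by omega⟩
    rw [findLoopA, if_neg (by omega)]
    rfl
  | cons x rest ih =>
    intro nums trk miss added fuel htrk hdrop hbound hmiss hfuel
    have hlen : trk.toNat < nums.length := by
      by_contra h
      have : nums.drop trk.toNat = [] := List.drop_eq_nil_of_le (by omega)
      rw [this] at hdrop; exact (List.cons_ne_nil _ _) hdrop
    have hltI : trk < (nums.length : Int) := by omega
    have hget : (PySem.List.pyGet? nums trk).getD 0 = x := by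
      rw [PySem.List.pyGet?_of_nonneg nums htrk]
      have : nums[trk.toNat]? = some x := by
        have h0 : (nums.drop trk.toNat)[0]? = some x := by rw [← hdrop]; rfl
        rwa [List.getElem?_drop, Nat.add_zero] at h0
      rw [this]; rfl
    have hx : 0 ≤ x ∧ x ≤ 2147483648 := by
      apply hbound
      have : x ∈ nums.drop trk.toNat := by rw [← hdrop]; exact List.mem_cons_self ..
      exact List.mem_of_mem_drop this
    have hdrop' : rest = nums.drop (trk + 1).toNat := by
      have : (trk + 1).toNat = trk.toNat + 1 := by omega
      rw [this, ← List.drop_drop, ← hdrop]; rfl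
    by_cases hcmp : x ≤ miss
    · -- absorb
      obtain ⟨f, rfl⟩ : ∃ f, fuel = f + 1 := ⟨fuel - 1, by omega⟩
      rw [findLoopA, if_pos hltI, if_pos (by rw [hget]; exact hcmp), hget]
      rw [ih nums (trk + 1) (miss + x) added f (by omega) hdrop' hbound (by omega)
          (by simp at hfuel ⊢; omega)]
      rw [findLoopB, if_pos hcmp]
    · -- doubling burst of k steps, then absorb
      push_neg at hcmp
      obtain ⟨hk1, hk31, hlow, hhigh⟩ := step_facts miss x hmiss hcmp hx.2
      set q := PySem.Int.floordiv (x + miss - 1) miss with hq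
      set k := PySem.Int.bitLength (q - 1) with hkdef
      obtain ⟨f, rfl⟩ : ∃ f, fuel = (f + 1) + k := ⟨fuel - 1 - k, by
        simp at hfuel; omega⟩
      rw [loopA_doubles nums k (f + 1) miss trk added hltI
          (fun j hj => by
            rw [hget]
            calc miss * 2 ^ j ≤ miss * 2 ^ (k - 1) := by
                  apply mul_le_mul_of_nonneg_left _ (by omega)
                  exact pow_le_pow_right₀ (by norm_num) (by omega)
              _ < x := hlow)]
      rw [findLoopA, if_pos hltI, if_pos (by rw [hget]; exact hhigh), hget]
      rw [ih nums (trk + 1) (miss * 2 ^ k + x) (added + (k : Int)) f (by omega) hdrop'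
          hbound (by nlinarith [hx.1, pow_pos (show (0:Int) < 2 by norm_num) k])
          (by simp at hfuel ⊢; omega)]
      rw [findLoopB, if_neg (by omega)]
      simp only [Int.shiftLeft_eq]
      rw [← hq, ← hkdef]

-- ===== VERDICT (by name: the statement is the Claim_ definition above) =====
theorem find_num_patches_spec : Claim_equal_find_num_patches := by
  intro nums tar hdom hpre
  unfold Spec_find_num_patches find_num_patches find_num_patches_alt
  apply loop_eq nums nums 0 1 0 (33 * nums.length + 1) le_rfl rfl _ le_rfl le_rfl
  intro x hx
  refine ⟨hpre x hx, ?_⟩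
  unfold Dom_find_num_patches at hdom
  simp [pvDomInt, List.all_eq_true] at hdom
  exact (hdom.1 x hx).2
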